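-- pv_equiv track=rewrite | github.com/Madeep2000/ComSec | ComSec作业2/mysbox.py | xgcd
-- ===== SOURCE A (Python) =====
-- def inner_mul(a,times):
--     if times == 0:
--         return a
--
--     elif a > 127:
--         a = a<<1
--         a = a % 256
--         a = a^27
--
--
--     else:
--         a = a<<1
--
--
--     times = times - 1
--     return inner_mul(a,times)
--
-- def mul(a,b):
--     result = 0
--     bb = '{:08b}'.format(b)
--     bb = bb[::-1]
--     for i in range(8):
--         if(bb[i] == '1'):
--             result = result^inner_mul(a,i)
--
--         else:
--             pass
--
--     return result
--
-- def length(a):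
--     #return len(bin(a)[2:])
--     leng = 0
--     while(a):
--         a = a>>1
--         leng = leng + 1
--     return leng
--
-- def division(a,b):
--     len1=length(a)
--     len2=length(b)
--     len3=len1-len2
--
--     if a<b:                   #被除数小于除数
--         if len3==0:           #两个数的长度相同，则直接商1，余数是二者异或的结果
--             return (1,a^b)
--         else:
--             return (0,a)      #如果被除数的位数小于除数，则商0，余数为a
--
--     topBit=1
--     topBit<<=(len1-1)
--     b<<=len3                  #把b的位数扩充到和a一致
--
--     quotient=0
--     remainder=0
--
--     for i in range(len3):
--         quotient<<=1
--         if (topBit&a):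
--             quotient^=1
--             a^=b
--         else:
--             a^=0
--         topBit>>=1
--         b>>=1
--
--
--     quotient<<=1
--     if a<b:
--         remainder=a
--     else:
--         quotient^=1
--         remainder=a^b
--
--     return quotient,remainder
--
-- def xgcd(m,n):
--     r0,r1,s0,s1=1,0,0,1
--     while(n):
--         qq,rr=division(m,n)
--         q,m,n=qq,n,rr
--         r0,r1=r1,r0^mul(q,r1)
--         s0,s1=s1,s0^mul(q,s1)
--     return s0
-- ===== SOURCE B (Python) =====
-- def length(a):
--     leng = 0
--     while(a):
--         a = a>>1
--         leng = leng + 1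
--     return leng
--
-- def division(a,b):
--     len1=length(a)
--     len2=length(b)
--     len3=len1-len2
--
--     if a<b:
--         if len3==0:
--             return (1,a^b)
--         else:
--             return (0,a)
--
--     topBit=1
--     topBit<<=(len1-1)
--     b<<=len3
--
--     quotient=0
--     remainder=0
--
--     for i in range(len3):
--         quotient<<=1
--         if (topBit&a):
--             quotient^=1
--             a^=b
--         else:
--             a^=0
--         topBit>>=1
--         b>>=1
--
--     quotient<<=1
--     if a<b:
--         remainder=a
--     else:
--         quotient^=1
--         remainder=a^b
--
--     return quotient,remainder
--
-- def mul(a, b):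
--     result = 0
--     for _ in range(8):
--         if b & 1:
--             result ^= a
--         a = ((a << 1) % 256) ^ 27 if a > 127 else a << 1
--         b >>= 1
--     return result
--
-- def _quotients(m, n):
--     if n == 0:
--         return []
--     q, r = division(m, n)
--     return [q] + _quotients(n, r)
--
-- def xgcd(m, n):
--     s0, s1 = 0, 1
--     for q in _quotients(m, n):
--         s0, s1 = s1, s0 ^ mul(q, s1)
--     return s0
-- ===== Notes on version B (the rewrite author's own statement) =====
-- stated objective: alternative
-- what changed: Top level is restructured into two phases -- a recursive pass that extracts the list of GF(2)-polynomial quotients, then a fold over that list building the Bezout coefficient (the dead r0,r1 pair is dropped) -- and the string-format/recursive-inner_mul multiplication is replaced by an iterative Russian-peasant GF(2^8) multiply.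
import Mathlib
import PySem

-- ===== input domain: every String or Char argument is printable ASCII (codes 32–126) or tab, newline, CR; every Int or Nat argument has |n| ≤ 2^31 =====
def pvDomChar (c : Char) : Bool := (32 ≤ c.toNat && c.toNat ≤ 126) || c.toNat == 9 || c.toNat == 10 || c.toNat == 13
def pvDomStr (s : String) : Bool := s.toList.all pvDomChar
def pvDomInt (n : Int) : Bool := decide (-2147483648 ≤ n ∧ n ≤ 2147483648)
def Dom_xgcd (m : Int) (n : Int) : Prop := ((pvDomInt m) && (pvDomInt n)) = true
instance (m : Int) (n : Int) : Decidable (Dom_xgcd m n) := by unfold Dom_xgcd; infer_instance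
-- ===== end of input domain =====

-- B re-decomposes xgcd into a recursive quotient-extraction pass followed by a fold, and replaces
-- the string-format multiplication with an iterative Russian-peasant loop; same values, no speed claim.

-- ===== PORT A =====

-- inner_mul(a, times): recursion on times (Python's times is an int; it is only ever called with
-- times = i from range(8), so a Nat counter is exact there)
def innerMul (a : Int) : Nat → Int
  | 0 => a
  | t + 1 =>
    if a > 127 then innerMul (PySem.Int.bxor (PySem.Int.mod (a <<< 1) 256) 27) t
    else innerMul (a <<< 1) t

-- mul(a, b): "bb = '{:08b}'.format(b)[::-1]; bb[i] == '1'" is ported as the bit test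
-- (b >> i) & 1 == 1, which is exactly the reversed-format character for 0 ≤ b (the only b
-- reachable from xgcd when both Pythons return: b is one of the nonnegative r/s values).
def mulA (a b : Int) : Int :=
  (List.range 8).foldl
    (fun result (i : Nat) =>
      if PySem.Int.band (b >>> i) 1 = 1 then PySem.Int.bxor result (innerMul a i) else result)
    0

-- length(a): the while loop, with fuel 64 — on every input inside Dom on which Python returns, the value
-- it is applied to is nonnegative and < 2^33, so the loop runs at most 33 times; for a < 0 Python diverges.
def lengthAux : Nat → Int → Int → Int
  | 0, _, leng => leng
  | f + 1, a, leng => if a = 0 then leng else lengthAux f (a >>> (1 : Nat)) (leng + 1)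

def lengthA (a : Int) : Int := lengthAux 64 a 0

-- division(a, b): literal port; the loop state is (quotient, a, topBit, b).
-- The two .toNat casts are exact on every reachable call: xgcd only calls division with n ≠ 0,
-- so b ≥ 1 there, hence len1 ≥ len2 ≥ 1 and len3 ≥ 0 past the a < b branch.
def divisionA (a b : Int) : Int × Int :=
  let len1 := lengthA a
  let len2 := lengthA b
  let len3 := len1 - len2
  if a < b then
    if len3 = 0 then (1, PySem.Int.bxor a b) else (0, a)
  else
    let topBit : Int := (1 : Int) <<< (len1 - 1).toNat
    let b := b <<< len3.toNat
    let st :=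
      (PySem.List.pyRange 0 len3 1).foldl
        (fun (st : Int × Int × Int × Int) _ =>
          let quotient := st.1 <<< (1 : Nat)
          let a := st.2.1
          let topBit := st.2.2.1
          let b := st.2.2.2
          let qa :=
            if PySem.Int.band topBit a ≠ 0 then (PySem.Int.bxor quotient 1, PySem.Int.bxor a b)
            else (quotient, PySem.Int.bxor a 0)
          (qa.1, qa.2, topBit >>> (1 : Nat), b >>> (1 : Nat)))
        (0, a, topBit, b)
    let quotient := st.1 <<< (1 : Nat)
    let a := st.2.1
    let b := st.2.2.2
    if a < b then (quotient, a) else (PySem.Int.bxor quotient 1, PySem.Int.bxor a b)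

-- the while(n) loop, with fuel 64: inside Dom the remainder's bit length strictly decreases,
-- so at most ~35 iterations happen wherever Python returns; Python diverges on negative inputs.
def xgcdLoop : Nat → Int → Int → Int → Int → Int → Int → Int
  | 0, _, _, _, _, s0, _ => s0
  | f + 1, m, n, r0, r1, s0, s1 =>
    if n ≠ 0 then
      let qr := divisionA m n
      xgcdLoop f n qr.2 r1 (PySem.Int.bxor r0 (mulA qr.1 r1)) s1 (PySem.Int.bxor s0 (mulA qr.1 s1))
    else s0

def xgcd (m : Int) (n : Int) : Int := xgcdLoop 64 m n 1 0 0 1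

-- ===== PORT B =====

-- Source B mul(a, b): Russian-peasant loop, state (a, b, result); `if b & 1:` is the test b & 1 ≠ 0.
def mulB (a b : Int) : Int :=
  ((List.range 8).foldl
    (fun (st : Int × Int × Int) _ =>
      let a := st.1
      let b := st.2.1
      let result := if PySem.Int.band b 1 ≠ 0 then PySem.Int.bxor st.2.2 a else st.2.2
      let a := if a > 127 then PySem.Int.bxor (PySem.Int.mod (a <<< 1) 256) 27 else a <<< 1
      (a, b >>> (1 : Nat), result))
    (a, b, 0)).2.2

-- Source B _quotients(m, n): recursive quotient extraction (division, length are Source B's verbatim copies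
-- of A's helpers, so their ports are shared); fuel 64 as in the A port.
def quotsB : Nat → Int → Int → List Int
  | 0, _, _ => []
  | f + 1, m, n =>
    if n = 0 then [] else
      let qr := divisionA m n
      qr.1 :: quotsB f n qr.2

-- Source B xgcd(m, n): fold of the coefficient update over the quotient list.
def xgcd_alt (m : Int) (n : Int) : Int :=
  ((quotsB 64 m n).foldl
    (fun (s : Int × Int) q => (s.2, PySem.Int.bxor s.1 (mulB q s.2))) ((0 : Int), (1 : Int))).1

-- ===== PRECONDITION & SPEC =====
-- (no Pre_: the two ports agree on every input; on n < 0, or m < 0 with n ≠ 0, both Pythons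
-- loop forever in the same way, so there is no returned value to exclude)

def Spec_xgcd (m : Int) (n : Int) (out : Int) : Prop := out = xgcd_alt m n
instance (m : Int) (n : Int) (out : Int) : Decidable (Spec_xgcd m n out) := by unfold Spec_xgcd; infer_instance

-- ===== CLAIM (what is proved, stated in full; the proofs are below) =====
def Claim_equal_xgcd : Prop := ∀ (m : Int) (n : Int), Dom_xgcd m n → Spec_xgcd m n (xgcd m n)

-- ===== LEMMAS AND PROOFS =====

-- one GF(2^8) doubling step, shared by inner_mul's recursion and B's loop body
def stepFn (a : Int) : Int :=
  if a > 127 then PySem.Int.bxor (PySem.Int.mod (a <<< 1) 256) 27 else a <<< 1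

theorem innerMul_one_step (a : Int) (t : Nat) : innerMul a (t + 1) = innerMul (stepFn a) t := by
  rw [innerMul, stepFn, apply_ite (fun x => innerMul x t)]

theorem innerMul_succ (a : Int) (t : Nat) : innerMul a (t + 1) = stepFn (innerMul a t) := by
  induction t generalizing a with
  | zero => rw [innerMul_one_step]; simp [innerMul]
  | succ t ih => rw [innerMul_one_step, ih, innerMul_one_step]

theorem int_shiftRight_succ (x : Int) (k : Nat) : (x >>> k) >>> (1 : Nat) = x >>> (k + 1) := by
  rw [Int.shiftRight_add]

theorem band_one_ne_zero (x : Int) : (PySem.Int.band x 1 ≠ 0) ↔ (PySem.Int.band x 1 = 1) := by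
  rw [PySem.Int.band_one]
  rcases PySem.Int.mod_two_eq x with h | h <;> omega

-- invariant of B's multiplication fold: after i steps the state is
-- (inner_mul a i, b >> i, the partial result of A's fold)
theorem mulB_fold_inv (a b : Int) (i : Nat) :
    (List.range i).foldl
      (fun (st : Int × Int × Int) _ =>
        let a := st.1
        let b := st.2.1
        let result := if PySem.Int.band b 1 ≠ 0 then PySem.Int.bxor st.2.2 a else st.2.2
        let a := if a > 127 then PySem.Int.bxor (PySem.Int.mod (a <<< 1) 256) 27 else a <<< 1
        (a, b >>> (1 : Nat), result))
      (a, b, 0) =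
    (innerMul a i, b >>> i,
      (List.range i).foldl
        (fun result (j : Nat) =>
          if PySem.Int.band (b >>> j) 1 = 1 then PySem.Int.bxor result (innerMul a j) else result)
        0) := by
  induction i with
  | zero => simp [innerMul]
  | succ i ih =>
    rw [List.range_succ, List.foldl_append, List.foldl_append, ih]
    simp only [List.foldl_cons, List.foldl_nil]
    refine Prod.ext ?_ (Prod.ext ?_ ?_)
    · simp [innerMul_succ, stepFn]
    · simp [int_shiftRight_succ]
    · by_cases h : PySem.Int.band (b >>> i) 1 = 1
      · rw [if_pos ((band_one_ne_zero (b >>> i)).mpr h), if_pos h]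
      · have h2 : ¬ PySem.Int.band (b >>> i) 1 ≠ 0 := fun hne => h ((band_one_ne_zero (b >>> i)).mp hne)
        rw [if_neg h2, if_neg h]

theorem mulA_eq_mulB (a b : Int) : mulA a b = mulB a b := by
  unfold mulA mulB
  rw [mulB_fold_inv]

-- A's while loop equals B's fold over the extracted quotient list, for every fuel and state
theorem loop_eq_fold (f : Nat) :
    ∀ m n r0 r1 s0 s1 : Int,
      xgcdLoop f m n r0 r1 s0 s1 =
        ((quotsB f m n).foldl
          (fun (s : Int × Int) q => (s.2, PySem.Int.bxor s.1 (mulA q s.2))) (s0, s1)).1 := by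
  induction f with
  | zero => intro m n r0 r1 s0 s1; simp [xgcdLoop, quotsB]
  | succ f ih =>
    intro m n r0 r1 s0 s1
    rw [xgcdLoop, quotsB]
    by_cases h : n = 0
    · simp [h]
    · simp only [h, ne_eq, not_false_eq_true, if_true]
      exact ih _ _ _ _ _ _

theorem xgcd_eq_alt (m n : Int) : xgcd m n = xgcd_alt m n := by
  unfold xgcd xgcd_alt
  rw [loop_eq_fold]
  have hf : (fun (s : Int × Int) q => (s.2, PySem.Int.bxor s.1 (mulA q s.2)))
      = (fun (s : Int × Int) q => (s.2, PySem.Int.bxor s.1 (mulB q s.2))) := by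
    funext s q; rw [mulA_eq_mulB]
  rw [hf]

-- ===== VERDICT (by name: the statement is the Claim_ definition above) =====
theorem xgcd_spec : Claim_equal_xgcd := by
  intro m n _
  exact xgcd_eq_alt m n
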